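-- pv_equiv track=rewrite | github.com/OE-LUCIFER/Jarvis_pipeline | jarvis/data_generator.py | get_hinglish_variations
-- ===== SOURCE A (Python) =====
-- from typing import List, Dict, Optional, Tuple
-- import itertools
--
-- HINGLISH_VARIATIONS = {
--     "open": ["kholo", "start karo", "shuru karo", "launch karo", "run karo"],
--     "close": ["band karo", "close karo", "exit karo", "quit karo", "khatam karo"],
--     "play": ["chalao", "play karo", "start karo", "shuru karo", "bajao"],
--     "search": ["dhundo", "search karo", "khojo", "find karo", "pata karo"],
--     "write": ["likho", "type karo", "draft karo", "compose karo", "create karo"],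
--     "show": ["dikhao", "display karo", "show karo", "dikha do", "dekhao"],
--     "tell": ["batao", "bolo", "explain karo", "samjhao", "describe karo"],
--     "please": ["plz", "pls", "please", "krpya", "kripya"],
--     "thanks": ["shukriya", "dhanyawad", "thanks", "thank u", "thnx"],
--     "hello": ["namaste", "hi", "hey", "hello", "hola"],
--     "bye": ["alvida", "bye", "tata", "phir milenge", "goodbye"],
-- }
--
-- def get_hinglish_variations(text: str) -> List[str]:
--     """Generate multiple Hinglish variations of the text."""
--     words = text.lower().split()
--     variations = []
--
--     for word in words:
--         if word in HINGLISH_VARIATIONS: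
--             variations.append(HINGLISH_VARIATIONS[word])
--         else:
--             variations.append([word])
--
--     # Generate combinations
--     return [" ".join(combo) for combo in itertools.product(*variations)]
-- ===== SOURCE B (Python) =====
-- HINGLISH_VARIATIONS = {
--     "open": ["kholo", "start karo", "shuru karo", "launch karo", "run karo"],
--     "close": ["band karo", "close karo", "exit karo", "quit karo", "khatam karo"],
--     "play": ["chalao", "play karo", "start karo", "shuru karo", "bajao"],
--     "search": ["dhundo", "search karo", "khojo", "find karo", "pata karo"],
--     "write": ["likho", "type karo", "draft karo", "compose karo", "create karo"],
--     "show": ["dikhao", "display karo", "show karo", "dikha do", "dekhao"],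
--     "tell": ["batao", "bolo", "explain karo", "samjhao", "describe karo"],
--     "please": ["plz", "pls", "please", "krpya", "kripya"],
--     "thanks": ["shukriya", "dhanyawad", "thanks", "thank u", "thnx"],
--     "hello": ["namaste", "hi", "hey", "hello", "hola"],
--     "bye": ["alvida", "bye", "tata", "phir milenge", "goodbye"],
-- }
--
--
-- def _total(lists):
--     t = 1
--     for l in lists:
--         t *= len(l)
--     return t
--
--
-- def _combo(lists, i):
--     """Decode output index i into its combination by mixed-radix digits
--     (leftmost word is the most significant digit, so it varies slowest)."""
--     if not lists:
--         return []
--     t = _total(lists[1:])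
--     return [lists[0][i // t]] + _combo(lists[1:], i % t)
--
--
-- def get_hinglish_variations(text):
--     """Generate multiple Hinglish variations of the text by random-access
--     mixed-radix decoding of each output index (no product/frontier iteration)."""
--     lists = [HINGLISH_VARIATIONS.get(w, [w]) for w in text.lower().split()]
--     return [" ".join(_combo(lists, i)) for i in range(_total(lists))]
-- ===== Notes on version B (the rewrite author's own statement) =====
-- stated objective: alternative
-- what changed: Replaces A's collect-variation-lists-then-itertools.product enumeration with random-access construction: compute the total count, then decode each output index i by mixed-radix division/modulus into the digit selecting each word's variant.
import Mathlib
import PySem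

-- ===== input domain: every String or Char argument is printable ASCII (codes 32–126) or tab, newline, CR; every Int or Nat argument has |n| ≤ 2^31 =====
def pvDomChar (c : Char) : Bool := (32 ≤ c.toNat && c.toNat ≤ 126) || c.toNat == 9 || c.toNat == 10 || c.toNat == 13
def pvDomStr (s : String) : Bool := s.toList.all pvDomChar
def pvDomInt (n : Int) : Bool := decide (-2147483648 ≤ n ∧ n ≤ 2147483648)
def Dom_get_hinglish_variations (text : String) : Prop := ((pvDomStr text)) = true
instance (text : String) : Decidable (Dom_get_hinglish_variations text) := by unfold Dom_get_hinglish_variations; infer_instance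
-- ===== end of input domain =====

-- B replaces A's collect-lists-then-itertools.product enumeration with random-access
-- mixed-radix decoding of each output index (alternative algorithm, same cost).

-- shared module constant HINGLISH_VARIATIONS
def hvDict : PySem.Dict String (List String) := PySem.Dict.ofList [
  ("open", ["kholo", "start karo", "shuru karo", "launch karo", "run karo"]),
  ("close", ["band karo", "close karo", "exit karo", "quit karo", "khatam karo"]),
  ("play", ["chalao", "play karo", "start karo", "shuru karo", "bajao"]),
  ("search", ["dhundo", "search karo", "khojo", "find karo", "pata karo"]),
  ("write", ["likho", "type karo", "draft karo", "compose karo", "create karo"]),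
  ("show", ["dikhao", "display karo", "show karo", "dikha do", "dekhao"]),
  ("tell", ["batao", "bolo", "explain karo", "samjhao", "describe karo"]),
  ("please", ["plz", "pls", "please", "krpya", "kripya"]),
  ("thanks", ["shukriya", "dhanyawad", "thanks", "thank u", "thnx"]),
  ("hello", ["namaste", "hi", "hey", "hello", "hola"]),
  ("bye", ["alvida", "bye", "tata", "phir milenge", "goodbye"])]

-- ===== PORT A =====
-- itertools.product(*variations) (leftmost factor varies slowest), as A unpacks it
def hvProduct : List (List String) → List (List String)
  | [] => [[]]
  | l :: ls => l.flatMap (fun x => (hvProduct ls).map (x :: ·))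

def get_hinglish_variations (text : String) : List String :=
  let words := PySem.Str.split₀ (PySem.Str.lower text)
  let variations := words.foldl (fun acc w =>
      match PySem.Dict.get? hvDict w with   -- 'if word in HINGLISH_VARIATIONS: … [word]'
      | some l => acc ++ [l]
      | none => acc ++ [[w]]) []
  (hvProduct variations).map (fun combo => PySem.Str.join " " combo)

-- ===== PORT B =====
-- Source B's _total
def hvTotalB (ls : List (List String)) : Nat := ls.foldl (fun t l => t * l.length) 1

-- Source B's _combo: decode output index i by mixed-radix digits, leftmost most significant.
-- The index i / hvTotalB ls is always < l.length at every call site (proved below), so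
-- Python's lists[0][i // t] never raises; getD with "" transcribes that in-range access.
def hvCombo : List (List String) → Nat → List String
  | [], _ => []
  | l :: ls, i =>
    let t := hvTotalB ls
    l.getD (i / t) "" :: hvCombo ls (i % t)

def get_hinglish_variations_alt (text : String) : List String :=
  let lists := (PySem.Str.split₀ (PySem.Str.lower text)).map
      (fun w => PySem.Dict.getD hvDict w [w])
  (List.range (hvTotalB lists)).map (fun i => PySem.Str.join " " (hvCombo lists i))

-- ===== PRECONDITION & SPEC =====
def Spec_get_hinglish_variations (text : String) (out : List String) : Prop := out = get_hinglish_variations_alt text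
instance (text : String) (out : List String) : Decidable (Spec_get_hinglish_variations text out) := by unfold Spec_get_hinglish_variations; infer_instance

-- ===== CLAIM (what is proved, stated in full; the proofs are below) =====
def Claim_equal_get_hinglish_variations : Prop := ∀ (text : String), Dom_get_hinglish_variations text → Spec_get_hinglish_variations text (get_hinglish_variations text)

-- ===== LEMMAS AND PROOFS =====

-- A's 'if word in …' branch computes exactly B's .get(word, [word]) lookup
theorem hv_lookup_eq (acc : List (List String)) (w : String) :
    (match PySem.Dict.get? hvDict w with
      | some l => acc ++ [l]
      | none => acc ++ [[w]]) = acc ++ [PySem.Dict.getD hvDict w [w]] := by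
  simp only [PySem.Dict.getD]
  cases PySem.Dict.get? hvDict w <;> simp

-- A's variation-collecting loop is the map of B's lookup over the words
theorem variations_eq_map (ws : List String) (acc : List (List String)) :
    ws.foldl (fun acc w =>
      match PySem.Dict.get? hvDict w with
      | some l => acc ++ [l]
      | none => acc ++ [[w]]) acc
      = acc ++ ws.map (fun w => PySem.Dict.getD hvDict w [w]) := by
  induction ws generalizing acc with
  | nil => simp
  | cons w ws ih => rw [List.foldl_cons, hv_lookup_eq, ih]; simp

-- every dict value is nonempty, so every looked-up list is nonempty
theorem hv_items_ne_nil : ∀ p ∈ hvDict.items, p.2 ≠ [] := by decide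

theorem hv_getD_ne_nil (w : String) : PySem.Dict.getD hvDict w [w] ≠ [] := by
  rw [PySem.Dict.getD_eq_get?_getD]
  cases h : PySem.Dict.get? hvDict w with
  | none => simp
  | some l =>
    have hm := PySem.Dict.mem_items_of_get?_eq_some _ h
    simpa using hv_items_ne_nil (w, l) hm

theorem hv_total_cons (a : Nat) (ls : List (List String)) :
    ls.foldl (fun t l => t * l.length) a = a * hvTotalB ls := by
  induction ls generalizing a with
  | nil => simp [hvTotalB]
  | cons l ls ih =>
    rw [List.foldl_cons, ih]
    conv_rhs => rw [hvTotalB, List.foldl_cons, ih]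
    ring

theorem range_mul_flatMap (s t : Nat) :
    List.range (s * t) = (List.range s).flatMap (fun q => (List.range t).map (fun r => q * t + r)) := by
  induction s with
  | zero => simp
  | succ s ih =>
    rw [Nat.succ_mul, List.range_add, ih, List.range_succ, List.flatMap_append]
    simp [Nat.mul_comm]

theorem hvTotalB_cons (l : List String) (ls : List (List String)) :
    hvTotalB (l :: ls) = l.length * hvTotalB ls := by
  rw [hvTotalB, List.foldl_cons, hv_total_cons]; ring

theorem hv_total_pos : ∀ (ls : List (List String)), (∀ l ∈ ls, l ≠ []) → 0 < hvTotalB ls := by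
  intro ls
  induction ls with
  | nil => intro _; simp [hvTotalB]
  | cons l ls ih =>
    intro hne
    rw [hvTotalB_cons]
    exact Nat.mul_pos (List.length_pos_of_ne_nil (hne l (by simp)))
      (ih (fun m hm => hne m (by simp [hm])))

-- mixed-radix decoding of the range enumerates A's Cartesian product in order
theorem range_decode_eq_product : ∀ (ls : List (List String)), (∀ l ∈ ls, l ≠ []) →
    (List.range (hvTotalB ls)).map (fun i => hvCombo ls i) = hvProduct ls := by
  intro ls
  induction ls with
  | nil => intro _; simp [hvTotalB, hvCombo, hvProduct]
  | cons l ls ih =>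
    intro hne
    have ht := hv_total_pos ls (fun m hm => hne m (by simp [hm]))
    have hl' : l = (List.range l.length).map (fun q => l.getD q "") := by
      apply List.ext_getElem (by simp)
      intro n h1 h2
      simp [List.getD_eq_getElem?_getD, List.getElem?_eq_getElem (by simpa using h2)]
    rw [hvTotalB_cons, range_mul_flatMap, List.map_flatMap]
    simp only [hvProduct]
    rw [← ih (fun m hm => hne m (by simp [hm]))]
    conv_rhs => rw [hl', List.flatMap_map]
    rw [List.flatMap_def, List.flatMap_def]
    apply congrArg List.flatten
    apply List.map_congr_left
    intro q hq
    simp only [List.mem_range] at hq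
    rw [List.map_map, List.map_map]
    apply List.map_congr_left
    intro r hr
    simp only [List.mem_range] at hr
    simp only [Function.comp_def, hvCombo]
    rw [Nat.mul_comm q, Nat.mul_add_div ht, Nat.div_eq_of_lt hr, Nat.mul_add_mod,
      Nat.mod_eq_of_lt hr]
    simp

-- ===== VERDICT (by name: the statement is the Claim_ definition above) =====
theorem get_hinglish_variations_spec : Claim_equal_get_hinglish_variations := by
  intro text _
  have hne : ∀ l ∈ (PySem.Str.split₀ (PySem.Str.lower text)).map
      (fun w => PySem.Dict.getD hvDict w [w]), l ≠ [] := by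
    intro l hl
    simp only [List.mem_map] at hl
    obtain ⟨w, _, hw⟩ := hl
    rw [← hw]; exact hv_getD_ne_nil w
  unfold Spec_get_hinglish_variations get_hinglish_variations get_hinglish_variations_alt
  simp only [variations_eq_map, List.nil_append, ← range_decode_eq_product _ hne,
    List.map_map]
  rfl
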